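-- pv_equiv track=rewrite | github.com/Marty42780/NSI-1ere | Exercices_Python/Evaluation-3_Python.py | sommeColonne
-- ===== SOURCE A (Python) =====
-- def sommeColonne(grille: list):
--     somme = 0
--     for colone in range(grille[0].__len__()):
--         for ligne in grille:
--             somme += ligne[colone]
--         grille[-1][colone] = somme
--         somme = 0
--     return grille
-- ===== SOURCE B (Python) =====
-- def sommeColonne(grille: list):
--     n = len(grille[0])
--     totals = [0] * n
--     for ligne in grille:
--         totals = [totals[c] + ligne[c] for c in range(n)]
--     for c in range(n):
--         grille[-1][c] = totals[c]
--     return grille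
-- ===== Notes on version B (the rewrite author's own statement) =====
-- stated objective: alternative
-- what changed: Replaces A's column-major scan with a single accumulator by a row-major single pass maintaining a list of per-column partial sums, followed by one write-back loop into the last row.
import Mathlib
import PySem

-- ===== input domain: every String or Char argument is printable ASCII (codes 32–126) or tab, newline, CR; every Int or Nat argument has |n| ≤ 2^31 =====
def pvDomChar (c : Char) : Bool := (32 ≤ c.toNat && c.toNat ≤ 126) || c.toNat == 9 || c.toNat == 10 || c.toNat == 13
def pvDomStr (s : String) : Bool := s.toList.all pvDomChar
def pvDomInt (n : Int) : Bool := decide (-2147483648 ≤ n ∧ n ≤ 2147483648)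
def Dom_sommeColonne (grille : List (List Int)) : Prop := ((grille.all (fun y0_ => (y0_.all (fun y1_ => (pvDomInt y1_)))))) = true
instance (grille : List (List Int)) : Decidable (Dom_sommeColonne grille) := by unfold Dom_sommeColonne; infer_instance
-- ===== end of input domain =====

-- B replaces A's column-major scan (one running sum per column) by a row-major pass keeping a
-- list of per-column partial sums, then one write-back loop (objective: alternative decomposition).
-- Both A and B mutate the input's last row in place and return the same list; same side effect.

-- ===== PORT A =====
-- models Python's `g[-1][c] = v` (the raising cases — empty g, short last row — are excluded by Pre_)
def pvWriteLast (g : List (List Int)) (c : Nat) (v : Int) : List (List Int) :=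
  PySem.List.pySetD g (-1) (PySem.List.pySetD (PySem.List.pyGetD g (-1) []) (c : Int) v)

def sommeColonne (grille : List (List Int)) : List (List Int) :=
  -- `somme` starts at 0 and is reset to 0 after each column, so each column's
  -- inner loop is a fold with initial value 0
  (List.range (PySem.List.pyGetD grille 0 []).length).foldl
    (fun g (colone : Nat) =>
      let somme := g.foldl (fun s ligne => s + PySem.List.pyGetD ligne (colone : Int) 0) 0
      pvWriteLast g colone somme)
    grille

-- ===== PORT B =====
def sommeColonne_alt (grille : List (List Int)) : List (List Int) :=
  let n := (PySem.List.pyGetD grille 0 []).length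
  let totals := grille.foldl
    (fun t ligne =>
      (List.range n).map (fun (c : Nat) => PySem.List.pyGetD t (c : Int) 0 + PySem.List.pyGetD ligne (c : Int) 0))
    (List.replicate n 0)
  (List.range n).foldl (fun g (c : Nat) => pvWriteLast g c (PySem.List.pyGetD totals (c : Int) 0)) grille

-- ===== PRECONDITION & SPEC =====
-- Pre_ excludes exactly the inputs where Python A raises IndexError: the empty grid and
-- grids with a row shorter than the first row (B raises IndexError there too).
def Pre_sommeColonne (grille : List (List Int)) : Prop :=
  grille ≠ [] ∧ ∀ row ∈ grille, (grille.getD 0 []).length ≤ row.length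
instance (grille : List (List Int)) : Decidable (Pre_sommeColonne grille) := by
  unfold Pre_sommeColonne; infer_instance

def pvWitness_sommeColonne : List (List Int) := [[1, 2], [3, 4]]

def Spec_sommeColonne (grille : List (List Int)) (out : List (List Int)) : Prop := out = sommeColonne_alt grille
instance (grille : List (List Int)) (out : List (List Int)) : Decidable (Spec_sommeColonne grille out) := by unfold Spec_sommeColonne; infer_instance

-- ===== CLAIM (what is proved, stated in full; the proofs are below) =====
def Claim_equal_sommeColonne : Prop := ∀ (grille : List (List Int)), Dom_sommeColonne grille → Pre_sommeColonne grille → Spec_sommeColonne grille (sommeColonne grille)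

-- ===== LEMMAS AND PROOFS =====

-- sum of column c of a grid (0 default for missing cells, matching the ports' pyGetD defaults)
def colS (g : List (List Int)) (c : Nat) : Int := (g.map (fun r => r.getD c 0)).sum

theorem foldl_colS (g : List (List Int)) (c : Nat) :
    ∀ a : Int, g.foldl (fun s r => s + r.getD c 0) a = a + colS g c := by
  induction g with
  | nil => intro a; simp [colS]
  | cons r rs ih => intro a; simp [colS] at ih ⊢; rw [ih]; ring

theorem pySetD_neg_one {α : Type} (xs : List α) (v : α) :
    PySem.List.pySetD xs (-1) v = xs.set (xs.length - 1) v := by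
  rcases List.eq_nil_or_concat xs with h | ⟨ys, y, rfl⟩
  · subst h; rfl
  · simp only [List.concat_eq_append]
    rw [show ((ys ++ [y]).length - 1) = ys.length by simp]
    simp [PySem.List.pySetD, PySem.List.pySet?, PySem.List.pyIdx?, List.set_append]

theorem writeLast_concat (xs : List (List Int)) (r : List Int) (c : Nat) (v : Int) :
    pvWriteLast (xs ++ [r]) c v = xs ++ [r.set c v] := by
  unfold pvWriteLast
  rw [PySem.List.pyGetD_neg_one_append_singleton, pySetD_neg_one,
      show ((xs ++ [r]).length - 1) = xs.length by simp]
  simp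

theorem colS_writeLast (g : List (List Int)) (c c' : Nat) (v : Int) (h : c ≠ c') :
    colS (pvWriteLast g c v) c' = colS g c' := by
  rcases List.eq_nil_or_concat g with rfl | ⟨ys, y, rfl⟩
  · rfl
  · simp only [List.concat_eq_append]
    rw [writeLast_concat]
    simp [colS, List.getD, h]

theorem stepA_eq_stepB (grille : List (List Int)) : ∀ k : Nat,
    (List.range k).foldl
      (fun g colone => pvWriteLast g colone
        (g.foldl (fun s ligne => s + ligne.getD colone 0) 0)) grille
    = (List.range k).foldl (fun g c => pvWriteLast g c (colS grille c)) grille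
    ∧ ∀ c', k ≤ c' →
      colS ((List.range k).foldl (fun g c => pvWriteLast g c (colS grille c)) grille) c'
        = colS grille c' := by
  intro k
  induction k with
  | zero => simp
  | succ k ih =>
    rw [List.range_succ]
    simp only [List.foldl_append, List.foldl_cons, List.foldl_nil]
    refine ⟨?_, ?_⟩
    · rw [ih.1, foldl_colS, ih.2 k le_rfl, zero_add]
    · intro c' hc'
      rw [colS_writeLast _ _ _ _ (by omega), ih.2 c' (by omega)]

theorem totals_getD (n : Nat) (c : Nat) (hc : c < n) : ∀ (rs : List (List Int)) (t : List Int),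
    (rs.foldl (fun t ligne => (List.range n).map (fun c => t.getD c 0 + ligne.getD c 0)) t).getD c 0
      = t.getD c 0 + colS rs c := by
  intro rs
  induction rs with
  | nil => intro t; simp [colS]
  | cons r rs ih =>
    intro t
    simp only [List.foldl_cons]
    rw [ih]
    have : ((List.range n).map (fun c => t.getD c 0 + r.getD c 0)).getD c 0
        = t.getD c 0 + r.getD c 0 := by
      rw [List.getD, List.getElem?_map]
      simp [List.getElem?_range hc]
    rw [this, colS]
    simp [colS]; ring

-- ===== VERDICT (by name: the statement is the Claim_ definition above) =====
theorem sommeColonne_spec : Claim_equal_sommeColonne := by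
  intro grille _ _
  unfold Spec_sommeColonne sommeColonne sommeColonne_alt
  simp only [PySem.List.pyGetD_natCast]
  rw [(stepA_eq_stepB grille _).1]
  apply PySem.List.foldl_congr_mem
  intro acc c hc
  rw [totals_getD _ c (List.mem_range.mp hc)]
  simp
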